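-- pv_equiv track=rewrite | github.com/EgorKhabarov/TODO-bot | tgbot/buttons_utils.py | decode_id
-- ===== SOURCE A (Python) =====
-- alphabet = "0123456789aAbBcCdDeEfFgGhHiIjJkKlLmMnNoOpPqQrRsStTuUvVwWxXyYzZ"
--
-- def exel_str_int(excel_string: str) -> int:
--     return sum(
--         (alphabet.index(char) + 1) * len(alphabet) ** i
--         for i, char in enumerate(reversed(excel_string))
--     )
--
-- def decode_id(input_ids: str) -> list[int]:
--     """
--     >>> decode_id("0,,,,,,,")
--     [1, 2, 3, 4, 5, 6, 7, 8]
--     >>> decode_id("0,,3,5,7")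
--     [1, 2, 4, 6, 8]
--     >>> decode_id("0,,3,5,7,")
--     [1, 2, 4, 6, 8, 9]
--     """
--
--     if (not input_ids) or input_ids == "_":
--         return []
--
--     result = []
--     ids: list[int | Ellipsis] = [
--         exel_str_int(i) if i else ... for i in input_ids.split(",")
--     ]
--     current_number = ids[0]
--
--     if current_number is ...:
--         raise ValueError("...")
--
--     for char in ids:
--         if char is ...:
--             current_number += 1
--         else:
--             current_number = char
--         result.append(current_number)
--     return result
-- ===== SOURCE B (Python) =====
-- alphabet = "0123456789aAbBcCdDeEfFgGhHiIjJkKlLmMnNoOpPqQrRsStTuUvVwWxXyYzZ"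
--
--
-- def exel_str_int(excel_string: str) -> int:
--     # Horner evaluation left to right: no reversed(), no power terms.
--     acc = 0
--     for char in excel_string:
--         acc = acc * len(alphabet) + alphabet.index(char) + 1
--     return acc
--
--
-- def decode_id(input_ids: str) -> list[int]:
--     if (not input_ids) or input_ids == "_":
--         return []
--     tokens = input_ids.split(",")
--     if not tokens[0]:
--         raise ValueError("...")
--     result = []
--     current = 0
--     for tok in tokens:
--         current = exel_str_int(tok) if tok else current + 1
--         result.append(current)
--     return result
-- ===== Notes on version B (the rewrite author's own statement) =====
-- stated objective: simpler
-- what changed: exel_str_int becomes a left-to-right Horner fold (no reversed() and no 62**i big-integer power terms), and decode_id decodes in a single pass over the split tokens instead of first materialising an intermediate list of int/Ellipsis sentinels and then folding over it.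
import Mathlib
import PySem

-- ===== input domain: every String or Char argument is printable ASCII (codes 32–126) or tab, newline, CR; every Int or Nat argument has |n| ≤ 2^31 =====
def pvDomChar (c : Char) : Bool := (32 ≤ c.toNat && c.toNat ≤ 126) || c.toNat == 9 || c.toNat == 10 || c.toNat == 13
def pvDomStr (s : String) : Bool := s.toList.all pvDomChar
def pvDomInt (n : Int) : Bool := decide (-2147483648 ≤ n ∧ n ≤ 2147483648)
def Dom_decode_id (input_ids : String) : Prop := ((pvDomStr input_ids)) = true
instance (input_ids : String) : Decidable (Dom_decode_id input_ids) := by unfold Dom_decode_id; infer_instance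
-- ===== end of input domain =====

-- B: Horner fold for exel_str_int (no reversed()/power terms) and a single pass over the
-- split tokens in decode_id (no intermediate int/Ellipsis list) — simpler, same results.


def alphabetL : List Char := "0123456789aAbBcCdDeEfFgGhHiIjJkKlLmMnNoOpPqQrRsStTuUvVwWxXyYzZ".toList

-- ===== PORT A =====
-- alphabet.index raises ValueError for a char not in alphabet; Pre_ excludes those inputs,
-- so the port uses idxOf (exact whenever the char is present).
def exel_str_int_A (excel_string : List Char) : Int :=
  ((PySem.List.enumerate excel_string.reverse 0).map
    (fun p => ((alphabetL.idxOf p.2 : Int) + 1) * 62 ^ p.1.toNat)).sum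

def decode_id (input_ids : String) : List Int :=
  if input_ids = "" ∨ input_ids = "_" then []
  else
    let ids : List (Option Int) :=
      (PySem.Chars.splitOn input_ids.toList [',']).map
        (fun t => if t = [] then none else some (exel_str_int_A t))
    match ids with
    | [] => []            -- unreachable: split never returns []
    | c0 :: _ =>
      match c0 with
      | none => []        -- Python: raise ValueError("..."); excluded by Pre_
      | some n0 =>
        (ids.foldl (fun (st : Int × List Int) ch =>
            let cur := match ch with | none => st.1 + 1 | some v => v
            (cur, st.2 ++ [cur])) (n0, [])).2

-- ===== PORT B =====
def exel_str_int_B (excel_string : List Char) : Int :=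
  excel_string.foldl (fun acc c => acc * 62 + (alphabetL.idxOf c : Int) + 1) 0

def decode_id_alt (input_ids : String) : List Int :=
  if input_ids = "" ∨ input_ids = "_" then []
  else
    let tokens := PySem.Chars.splitOn input_ids.toList [',']
    match tokens with
    | [] => []            -- unreachable: split never returns []
    | t0 :: _ =>
      if t0 = [] then []  -- Python: raise ValueError("..."); excluded by Pre_
      else
        (tokens.foldl (fun (st : Int × List Int) t =>
            let cur := if t = [] then st.1 + 1 else exel_str_int_B t
            (cur, st.2 ++ [cur])) (0, [])).2

-- ===== PRECONDITION & SPEC =====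
-- Pre_ excludes exactly the inputs where Python A raises ValueError: a non-guarded input
-- whose first split token is empty (i.e. starting with ','), or containing a character
-- that is neither ',' nor in the alphabet (alphabet.index raises there).
def Pre_decode_id (input_ids : String) : Prop :=
  input_ids = "" ∨ input_ids = "_" ∨
    (input_ids.toList.head? ≠ some ',' ∧
     input_ids.toList.all (fun c => c == ',' || alphabetL.contains c) = true)
instance (input_ids : String) : Decidable (Pre_decode_id input_ids) := by
  unfold Pre_decode_id; infer_instance

def pvWitness_decode_id : String := "0,,3,5,7,"

def Spec_decode_id (input_ids : String) (out : List Int) : Prop := out = decode_id_alt input_ids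
instance (input_ids : String) (out : List Int) : Decidable (Spec_decode_id input_ids out) := by
  unfold Spec_decode_id; infer_instance

-- ===== CLAIM (what is proved, stated in full; the proofs are below) =====
def Claim_equal_decode_id : Prop := ∀ (input_ids : String), Dom_decode_id input_ids → Pre_decode_id input_ids → Spec_decode_id input_ids (decode_id input_ids)

-- ===== LEMMAS AND PROOFS =====

theorem exel_horner (l : List Char) (acc : Int) :
    l.foldl (fun acc c => acc * 62 + (alphabetL.idxOf c : Int) + 1) acc
      = acc * 62 ^ l.length + exel_str_int_A l := by
  induction l generalizing acc with
  | nil => simp [exel_str_int_A]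
  | cons c t ih =>
    simp only [List.foldl_cons, ih]
    have h : exel_str_int_A (c :: t)
        = exel_str_int_A t + ((alphabetL.idxOf c : Int) + 1) * 62 ^ t.length := by
      simp [exel_str_int_A, PySem.List.enumerate_append, PySem.List.enumerate]
    rw [h]
    simp [List.length_cons, pow_succ]
    ring

theorem exel_eq (l : List Char) : exel_str_int_B l = exel_str_int_A l := by
  simpa using exel_horner l 0

theorem fold_eq (ts : List (List Char)) (cur : Int) (acc : List Int) :
    (ts.map (fun t => if t = [] then none else some (exel_str_int_A t))).foldl
        (fun (st : Int × List Int) ch =>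
          let cur := match ch with | none => st.1 + 1 | some v => v
          (cur, st.2 ++ [cur])) (cur, acc)
      = ts.foldl (fun (st : Int × List Int) t =>
          let cur := if t = [] then st.1 + 1 else exel_str_int_B t
          (cur, st.2 ++ [cur])) (cur, acc) := by
  induction ts generalizing cur acc with
  | nil => rfl
  | cons t rest ih =>
    simp only [List.map_cons, List.foldl_cons]
    by_cases h : t = []
    · simpa [h] using ih (cur + 1) (acc ++ [cur + 1])
    · simpa [h, exel_eq] using ih (exel_str_int_A t) (acc ++ [exel_str_int_A t])

-- ===== VERDICT (by name: the statement is the Claim_ definition above) =====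
theorem decode_id_spec : Claim_equal_decode_id := by
  intro s _ _
  unfold Spec_decode_id decode_id decode_id_alt
  by_cases hg : s = "" ∨ s = "_"
  · simp [hg]
  · simp only [if_neg hg]
    cases hts : PySem.Chars.splitOn s.toList [','] with
    | nil => rfl
    | cons t0 rest =>
      by_cases h0 : t0 = []
      · simp [h0]
      · simp only [List.map_cons, if_neg h0, List.foldl_cons]
        simpa [h0, exel_eq] using
          congrArg Prod.snd (fold_eq rest (exel_str_int_A t0) [exel_str_int_A t0])
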